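-- pv_equiv track=rewrite | github.com/StefanAmur/rustbptracker | item_generator.py | get_display_name_from_file_lines
-- ===== SOURCE A (Python) =====
-- def get_display_name_from_file_lines(lines):
-- 	reading_lines = False
-- 	display_name_attributes = []
--
-- 	for line in lines:
-- 		if line.strip().startswith('"displayName"'):
-- 			reading_lines = True
--
-- 		if reading_lines:
-- 			display_name_attributes.append(line)
--
-- 		if line.strip().endswith('},'):
-- 			break
--
-- 	display_name_attributes = [line.strip() for line in display_name_attributes]
-- 	display_name = ''.join(display_name_attributes)
-- 	return display_name
-- ===== SOURCE B (Python) =====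
-- def get_display_name_from_file_lines(lines):
--     # two bounded index searches + a slice, instead of A's reading-flag state machine
--     end = next((i for i, l in enumerate(lines) if l.strip().endswith('},')), len(lines) - 1)
--     prefix = lines[:end + 1]
--     start = next((i for i, l in enumerate(prefix) if l.strip().startswith('"displayName"')), None)
--     if start is None:
--         return ''
--     return ''.join(l.strip() for l in prefix[start:])
-- ===== Notes on version B (the rewrite author's own statement) =====
-- stated objective: alternative
-- what changed: Replaced A's reading-flag/break state machine with two index searches (first terminator line, first displayName line within that bound) followed by a slice, strip and join.
import Mathlib
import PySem

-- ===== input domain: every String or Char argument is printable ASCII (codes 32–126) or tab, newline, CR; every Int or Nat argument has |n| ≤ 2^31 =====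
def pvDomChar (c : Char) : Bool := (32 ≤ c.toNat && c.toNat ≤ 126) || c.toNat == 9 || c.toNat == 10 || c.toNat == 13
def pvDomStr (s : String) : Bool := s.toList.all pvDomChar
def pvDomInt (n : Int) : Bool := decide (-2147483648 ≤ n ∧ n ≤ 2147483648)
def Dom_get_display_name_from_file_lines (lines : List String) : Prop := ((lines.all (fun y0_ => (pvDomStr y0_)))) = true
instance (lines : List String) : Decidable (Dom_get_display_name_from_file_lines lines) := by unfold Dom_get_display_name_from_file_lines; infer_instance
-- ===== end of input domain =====

-- B replaces A's reading-flag/break state machine with two index searches plus a slice (alternative decomposition, same cost).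

-- the two line tests both programs use: line.strip().endswith('},') and line.strip().startswith('"displayName"')
def pvPE (l : String) : Bool := PySem.Str.endswith (PySem.Str.strip l) "},"
def pvPS (l : String) : Bool := PySem.Str.startswith (PySem.Str.strip l) "\"displayName\""

-- ===== PORT A =====
-- the for-loop of A: state (reading_lines, display_name_attributes), break on first terminator line
def pvGoA (ls : List String) (reading : Bool) (acc : List String) : List String :=
  match ls with
  | [] => acc
  | l :: rest =>
    let reading := if pvPS l then true else reading
    let acc := if reading then acc ++ [l] else acc
    if pvPE l then acc else pvGoA rest reading acc

def get_display_name_from_file_lines (lines : List String) : String :=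
  let display_name_attributes := pvGoA lines false []
  let display_name_attributes := display_name_attributes.map PySem.Str.strip
  PySem.Str.join "" display_name_attributes

-- ===== PORT B =====
def get_display_name_from_file_lines_alt (lines : List String) : String :=
  let endIdx := (lines.findIdx? pvPE).getD (lines.length - 1)
  let pre := lines.take (endIdx + 1)
  match pre.findIdx? pvPS with
  | none => ""
  | some s => PySem.Str.join "" ((pre.drop s).map PySem.Str.strip)

-- ===== PRECONDITION & SPEC =====
def Spec_get_display_name_from_file_lines (lines : List String) (out : String) : Prop := out = get_display_name_from_file_lines_alt lines
instance (lines : List String) (out : String) : Decidable (Spec_get_display_name_from_file_lines lines out) := by unfold Spec_get_display_name_from_file_lines; infer_instance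

-- ===== CLAIM (what is proved, stated in full; the proofs are below) =====
def Claim_equal_get_display_name_from_file_lines : Prop := ∀ (lines : List String), Dom_get_display_name_from_file_lines lines → Spec_get_display_name_from_file_lines lines (get_display_name_from_file_lines lines)

-- ===== LEMMAS AND PROOFS =====

theorem pv_take_pred_succ {α : Type} (xs : List α) (h : xs ≠ []) :
    xs.take (xs.length - 1 + 1) = xs := by
  cases xs with
  | nil => exact absurd rfl h
  | cons a b => simp

-- the lines A collects once the flag is on: everything up to and including the first terminator
def pvUpTo : List String → List String
  | [] => []
  | l :: rest => if pvPE l then [l] else l :: pvUpTo rest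

theorem pvGoA_true (ls : List String) (acc : List String) :
    pvGoA ls true acc = acc ++ pvUpTo ls := by
  induction ls generalizing acc with
  | nil => simp [pvGoA, pvUpTo]
  | cons l rest ih =>
    by_cases he : pvPE l = true
    · simp [pvGoA, pvUpTo, he]
      try (split <;> simp)
    · simp only [Bool.not_eq_true] at he
      simp [pvGoA, pvUpTo, he, ih]
      try (split <;> simp)

theorem pvUpTo_eq_take (ls : List String) :
    pvUpTo ls = ls.take ((match ls.findIdx? pvPE with | some j => j + 1 | none => ls.length)) := by
  induction ls with
  | nil => simp [pvUpTo]
  | cons l rest ih =>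
    simp only [pvUpTo, List.findIdx?_cons]
    by_cases he : pvPE l = true
    · simp [he]
    · simp only [Bool.not_eq_true] at he
      simp only [he, Bool.false_eq_true, if_false]
      cases hf : rest.findIdx? pvPE with
      | none => simp [hf] at ih ⊢; simpa using ih
      | some j => simp [hf] at ih ⊢; simpa using ih

-- the list A collects equals the list B slices out
theorem pvGoA_eq (ls : List String) :
    pvGoA ls false [] =
      (let pre := ls.take (((ls.findIdx? pvPE).getD (ls.length - 1)) + 1)
       match pre.findIdx? pvPS with
       | none => []
       | some s => pre.drop s) := by
  induction ls with
  | nil => simp [pvGoA]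
  | cons l rest ih =>
    have htake : ∀ n : Nat, (l :: rest).take (n + 1) = l :: rest.take n := fun n => rfl
    simp only [pvGoA, List.findIdx?_cons]
    by_cases hs : pvPS l = true
    · -- displayName seen at the head: flag turns on
      by_cases he : pvPE l = true
      · simp [hs, he, List.findIdx?_cons]
      · simp only [Bool.not_eq_true] at he
        simp only [hs, if_true, he, Bool.false_eq_true, if_false, List.nil_append]
        rw [pvGoA_true]
        cases hf : rest.findIdx? pvPE with
        | none =>
          simp only [hf, Option.map_none, Option.getD_none, List.length_cons]
          rw [show rest.length + 1 - 1 = rest.length from rfl, htake]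
          simp [List.findIdx?_cons, hs, pvUpTo_eq_take, hf, List.take_length]
        | some j =>
          simp only [hf, Option.map_some, Option.getD_some]
          rw [htake]
          simp [List.findIdx?_cons, hs, pvUpTo_eq_take, hf]
    · simp only [Bool.not_eq_true] at hs
      by_cases he : pvPE l = true
      · -- terminator before any displayName: A breaks with []
        simp [hs, he, List.findIdx?_cons]
      · -- ordinary line: both sides reduce to the tail
        simp only [Bool.not_eq_true] at he
        simp only [hs, Bool.false_eq_true, if_false, he]
        rw [ih]
        cases hf : rest.findIdx? pvPE with
        | none =>
          simp only [hf, Option.map_none, Option.getD_none, List.length_cons]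
          rw [show rest.length + 1 - 1 = rest.length from rfl, htake]
          rw [show rest.take rest.length = rest from List.take_length]
          cases rest with
          | nil => simp [hs]
          | cons a b =>
            rw [pv_take_pred_succ (a :: b) (by simp)]
            cases hg : (a :: b).findIdx? pvPS with
            | none => simp [List.findIdx?_cons, hs, hg]
            | some s => simp [List.findIdx?_cons, hs, hg]
        | some j =>
          simp only [hf, Option.map_some, Option.getD_some]
          rw [htake]
          simp only [List.findIdx?_cons, hs, Bool.false_eq_true, if_false]
          cases hg : (rest.take (j + 1)).findIdx? pvPS with
          | none => simp [List.findIdx?_cons, hs, hg]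
          | some s => simp [List.findIdx?_cons, hs, hg]

-- ===== VERDICT (by name: the statement is the Claim_ definition above) =====
theorem get_display_name_from_file_lines_spec : Claim_equal_get_display_name_from_file_lines := by
  intro lines _
  unfold Spec_get_display_name_from_file_lines get_display_name_from_file_lines get_display_name_from_file_lines_alt
  have h := pvGoA_eq lines
  simp only at h
  rw [h]
  cases hg : (lines.take (((lines.findIdx? pvPE).getD (lines.length - 1)) + 1)).findIdx? pvPS with
  | none => simp [hg, PySem.Str.join]
  | some s => simp [hg]
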